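-- pv_equiv track=rewrite | github.com/filhaDeHades/Entropy | funcoes.py | converter_orientacao_para_cor
-- ===== SOURCE A (Python) =====
-- def converter_orientacao_para_cor(orientacao):
--     cor_r = 0
--     cor_g = 0
--     cor_b = 0
--
--     contador = 0
--
--     while contador <= orientacao:
--
--         if contador < 256:
--             cor_b = contador
--         elif contador < 512:
--             cor_g = contador - 255
--         else:
--             cor_r = contador - 510
--
--         contador += 1
--
--     cor_final = (cor_r, cor_g, cor_b)
--     return cor_final
-- ===== SOURCE B (Python) =====
-- def converter_orientacao_para_cor(orientacao):
--     cor_r = orientacao - 510 if orientacao >= 512 else 0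
--     cor_g = min(orientacao, 511) - 255 if orientacao >= 256 else 0
--     cor_b = min(orientacao, 255) if orientacao >= 0 else 0
--     return (cor_r, cor_g, cor_b)
-- ===== Notes on version B (the rewrite author's own statement) =====
-- stated objective: faster
-- what changed: Replaced the O(n) counting loop (which re-writes one colour channel on every iteration) with a closed-form piecewise clamp for each channel.
import Mathlib
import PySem

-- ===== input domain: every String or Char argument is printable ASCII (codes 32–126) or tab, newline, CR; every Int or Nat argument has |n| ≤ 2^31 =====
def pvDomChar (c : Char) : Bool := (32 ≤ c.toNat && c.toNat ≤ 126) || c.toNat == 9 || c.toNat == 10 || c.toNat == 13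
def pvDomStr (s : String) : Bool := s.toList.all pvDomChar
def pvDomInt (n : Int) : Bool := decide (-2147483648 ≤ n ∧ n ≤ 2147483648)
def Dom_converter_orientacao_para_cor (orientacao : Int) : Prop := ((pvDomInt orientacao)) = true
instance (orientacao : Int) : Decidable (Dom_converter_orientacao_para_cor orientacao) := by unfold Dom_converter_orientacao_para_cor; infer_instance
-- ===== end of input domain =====

-- B replaces A's O(n) counting loop with a closed-form piecewise clamp per channel (O(1)).


-- ===== PORT A =====
-- the while loop, step for step; state (cor_r, cor_g, cor_b) and the counter
def pvLoopA (orientacao contador cor_r cor_g cor_b : Int) : Int × Int × Int :=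
  if contador ≤ orientacao then
    if contador < 256 then
      pvLoopA orientacao (contador + 1) cor_r cor_g contador
    else if contador < 512 then
      pvLoopA orientacao (contador + 1) cor_r (contador - 255) cor_b
    else
      pvLoopA orientacao (contador + 1) (contador - 510) cor_g cor_b
  else (cor_r, cor_g, cor_b)
termination_by (orientacao + 1 - contador).toNat
decreasing_by all_goals omega

def converter_orientacao_para_cor (orientacao : Int) : Int × Int × Int :=
  pvLoopA orientacao 0 0 0 0

-- ===== PORT B =====
def converter_orientacao_para_cor_alt (orientacao : Int) : Int × Int × Int :=
  ( if orientacao ≥ 512 then orientacao - 510 else 0,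
    if orientacao ≥ 256 then min orientacao 511 - 255 else 0,
    if orientacao ≥ 0 then min orientacao 255 else 0 )

-- ===== PRECONDITION & SPEC =====
def Spec_converter_orientacao_para_cor (orientacao : Int) (out : Int × Int × Int) : Prop := out = converter_orientacao_para_cor_alt orientacao
instance (orientacao : Int) (out : Int × Int × Int) : Decidable (Spec_converter_orientacao_para_cor orientacao out) := by unfold Spec_converter_orientacao_para_cor; infer_instance

-- ===== CLAIM (what is proved, stated in full; the proofs are below) =====
def Claim_equal_converter_orientacao_para_cor : Prop := ∀ (orientacao : Int), Dom_converter_orientacao_para_cor orientacao → Spec_converter_orientacao_para_cor orientacao (converter_orientacao_para_cor orientacao)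

-- ===== LEMMAS AND PROOFS =====
-- closed form of A's loop from an arbitrary counter/state
theorem pvLoopA_closed (orientacao contador cor_r cor_g cor_b : Int) :
    pvLoopA orientacao contador cor_r cor_g cor_b =
      ( if contador ≤ orientacao ∧ 512 ≤ orientacao then orientacao - 510 else cor_r,
        if contador ≤ orientacao ∧ contador ≤ 511 ∧ 256 ≤ orientacao then min orientacao 511 - 255 else cor_g,
        if contador ≤ orientacao ∧ contador ≤ 255 then min orientacao 255 else cor_b ) := by
  fun_induction pvLoopA with
  | case1 c r g b h1 h2 ih => rw [ih]; simp only [Prod.mk.injEq]; refine ⟨?_, ?_, ?_⟩ <;> split_ifs <;> omega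
  | case2 c r g b h1 h2 h3 ih => rw [ih]; simp only [Prod.mk.injEq]; refine ⟨?_, ?_, ?_⟩ <;> split_ifs <;> omega
  | case3 c r g b h1 h2 h3 ih => rw [ih]; simp only [Prod.mk.injEq]; refine ⟨?_, ?_, ?_⟩ <;> split_ifs <;> omega
  | case4 c r g b h1 => simp only [Prod.mk.injEq]; refine ⟨?_, ?_, ?_⟩ <;> split_ifs <;> omega

-- ===== VERDICT (by name: the statement is the Claim_ definition above) =====
theorem converter_orientacao_para_cor_spec : Claim_equal_converter_orientacao_para_cor := by
  intro o _
  unfold Spec_converter_orientacao_para_cor converter_orientacao_para_cor converter_orientacao_para_cor_alt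
  rw [pvLoopA_closed]
  simp only [Prod.mk.injEq]
  refine ⟨?_, ?_, ?_⟩ <;> split_ifs <;> omega
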